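-- pv_equiv track=rewrite | github.com/vitamin33/threads-agent | services/achievement_collector/publishers/multi_platform_publisher.py | _get_most_impactful_story
-- ===== SOURCE A (Python) =====
-- from typing import Dict, List, Optional
--
-- def _get_most_impactful_story(stories: Dict) -> Optional[Dict]:
--     """Get story with highest impact for Twitter."""
--     if not stories:
--         return None
--
--     # Twitter prefers performance and innovation stories
--     priority = ["performance", "innovation", "feature", "business"]
--
--     for story_type in priority:
--         if story_type in stories:
--             return stories[story_type]
--
--     return list(stories.values())[0]
-- ===== SOURCE B (Python) =====
-- def _get_most_impactful_story(stories):
--     """Get story with highest impact for Twitter.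
--
--     Single pass over the stories: rank each story type by its position in the
--     priority list (unlisted types share the worst rank) and keep the first
--     story attaining the running-minimum rank.  No empty-dict guard is needed:
--     with no items the best value simply stays None.
--     """
--     priority = ["performance", "innovation", "feature", "business"]
--     best_val = None
--     best_rank = len(priority) + 1
--     for story_type, story in stories.items():
--         r = priority.index(story_type) if story_type in priority else len(priority)
--         if r < best_rank:
--             best_val, best_rank = story, r
--     return best_val
-- ===== Notes on version B (the rewrite author's own statement) =====
-- stated objective: alternative
-- what changed: A loops over the priority list doing a membership test and lookup in the dict for each type; B makes a single pass over the dict items keeping the first story of minimum priority rank, with no empty guard and no per-type dict scans.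
import Mathlib
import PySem

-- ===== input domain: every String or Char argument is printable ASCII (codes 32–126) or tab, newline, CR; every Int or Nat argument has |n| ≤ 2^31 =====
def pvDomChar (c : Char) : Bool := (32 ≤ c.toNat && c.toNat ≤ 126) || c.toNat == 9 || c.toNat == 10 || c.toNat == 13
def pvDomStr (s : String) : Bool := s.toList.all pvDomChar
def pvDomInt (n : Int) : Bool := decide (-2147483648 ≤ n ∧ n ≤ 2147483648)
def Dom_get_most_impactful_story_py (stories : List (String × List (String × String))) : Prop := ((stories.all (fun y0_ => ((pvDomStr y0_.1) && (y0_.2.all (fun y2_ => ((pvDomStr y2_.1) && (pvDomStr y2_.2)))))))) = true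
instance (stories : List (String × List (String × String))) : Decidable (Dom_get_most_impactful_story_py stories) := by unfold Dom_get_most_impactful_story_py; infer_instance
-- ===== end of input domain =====

-- B replaces A's per-priority-type dict scans with a single pass over the items keeping the first story of minimum rank (alternative decomposition, same cost).


-- ===== PORT A =====
-- the fixed priority list of A (and of B)
def pvPriority : List String := ["performance", "innovation", "feature", "business"]

-- stories[t] for a dict rendered as an assoc list: first pair with matching key (exact)
def pvLookup (stories : List (String × List (String × String))) (k : String) :
    Option (List (String × String)) :=
  (stories.find? (fun p => p.1 == k)).map Prod.snd

-- the 'for story_type in priority' loop with its early return; [] = loop fell through,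
-- then 'list(stories.values())[0]' (the guard in the caller ensures stories ≠ [])
def pvLoopA (stories : List (String × List (String × String))) :
    List String → Option (List (String × String))
  | [] => (stories.map Prod.snd).head?
  | t :: rest =>
    match pvLookup stories t with
    | some v => some v
    | none => pvLoopA stories rest

def get_most_impactful_story_py (stories : List (String × List (String × String))) :
    Option (List (String × String)) :=
  if stories = [] then none else pvLoopA stories pvPriority

-- ===== PORT B =====
-- r = priority.index(story_type) if story_type in priority else len(priority)
def pvRank (k : String) : Int :=
  if pvPriority.contains k then ((PySem.List.index? pvPriority k).getD 0 : Nat) else 4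

-- body of B's single loop: keep the first story attaining the running-minimum rank
def pvStep (acc : Option (List (String × String)) × Int) (p : String × List (String × String)) :
    Option (List (String × String)) × Int :=
  if pvRank p.1 < acc.2 then (some p.2, pvRank p.1) else acc

def get_most_impactful_story_py_alt (stories : List (String × List (String × String))) :
    Option (List (String × String)) :=
  (stories.foldl pvStep (none, 5)).1

-- ===== PRECONDITION & SPEC =====
def Spec_get_most_impactful_story_py (stories : List (String × List (String × String))) (out : Option (List (String × String))) : Prop := out = get_most_impactful_story_py_alt stories
instance (stories : List (String × List (String × String))) (out : Option (List (String × String))) : Decidable (Spec_get_most_impactful_story_py stories out) := by unfold Spec_get_most_impactful_story_py; infer_instance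

-- ===== CLAIM (what is proved, stated in full; the proofs are below) =====
def Claim_equal_get_most_impactful_story_py : Prop := ∀ (stories : List (String × List (String × String))), Dom_get_most_impactful_story_py stories → Spec_get_most_impactful_story_py stories (get_most_impactful_story_py stories)

-- ===== LEMMAS AND PROOFS =====

-- closed form of the rank function
theorem pvRank_eq (k : String) :
    pvRank k = if k = "performance" then 0 else if k = "innovation" then 1
      else if k = "feature" then 2 else if k = "business" then 3 else 4 := by
  unfold pvRank pvPriority
  by_cases h1 : k = "performance"
  · subst h1; decide
  by_cases h2 : k = "innovation"
  · subst h2; decide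
  by_cases h3 : k = "feature"
  · subst h3; decide
  by_cases h4 : k = "business"
  · subst h4; decide
  have hc : (["performance", "innovation", "feature", "business"] : List String).contains k = false := by
    simp only [List.contains_eq_mem, List.mem_cons, List.not_mem_nil, decide_eq_false_iff_not]
    tauto
  rw [hc]
  simp [h1, h2, h3, h4]

theorem pvRank_nonneg (k : String) : 0 ≤ pvRank k := by
  rw [pvRank_eq]; split_ifs <;> norm_num

theorem pvRank_le_four (k : String) : pvRank k ≤ 4 := by
  rw [pvRank_eq]; split_ifs <;> norm_num

-- minimum rank occurring in the list (5 if empty)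
def pvM : List (String × List (String × String)) → Int
  | [] => 5
  | p :: rest => min (pvRank p.1) (pvM rest)

theorem pvM_le (l : List (String × List (String × String))) :
    ∀ p ∈ l, pvM l ≤ pvRank p.1 := by
  induction l with
  | nil => intro p hp; simp at hp
  | cons q rest ih =>
    intro p hp
    rcases List.mem_cons.mp hp with h | h
    · subst h; simp [pvM]
    · have := ih p h; simp [pvM]; omega

theorem pvM_mem (l : List (String × List (String × String))) (h : l ≠ []) :
    ∃ p ∈ l, pvRank p.1 = pvM l := by
  induction l with
  | nil => exact absurd rfl h
  | cons q rest ih =>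
    by_cases hr : rest = []
    · subst hr
      exact ⟨q, List.mem_cons_self, by have := pvRank_le_four q.1; simp [pvM]; omega⟩
    · obtain ⟨p, hp, hpr⟩ := ih hr
      by_cases hle : pvRank q.1 ≤ pvM rest
      · exact ⟨q, List.mem_cons_self, by simp [pvM]; omega⟩
      · exact ⟨p, List.mem_cons_of_mem _ hp, by simp [pvM]; omega⟩

-- B's fold keeps the first pair attaining the minimum rank (below the running bound)
theorem pvFold_spec (l : List (String × List (String × String)))
    (b : Option (List (String × String))) (br : Int) (hbr : br ≤ 5) :
    l.foldl pvStep (b, br) =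
      if pvM l < br then
        ((l.find? (fun p => pvRank p.1 == pvM l)).map Prod.snd, pvM l)
      else (b, br) := by
  induction l generalizing b br with
  | nil => simp [pvM]; omega
  | cons q rest ih =>
    have hq4 := pvRank_le_four q.1
    simp only [List.foldl_cons, pvStep]
    by_cases h : pvRank q.1 < br
    · rw [if_pos h]
      rw [ih (some q.2) (pvRank q.1) (by omega)]
      by_cases h2 : pvM rest < pvRank q.1
      · have hm : pvM (q :: rest) = pvM rest := by simp [pvM]; omega
        rw [if_pos h2, hm, if_pos (by omega)]
        rw [List.find?_cons_of_neg]
        simp; omega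
      · have hm : pvM (q :: rest) = pvRank q.1 := by simp [pvM]; omega
        rw [if_neg h2, hm, if_pos h]
        rw [List.find?_cons_of_pos]
        · simp
        · simp
    · rw [if_neg h]
      rw [ih b br hbr]
      by_cases h2 : pvM rest < br
      · have hm : pvM (q :: rest) = pvM rest := by simp [pvM]; omega
        rw [if_pos h2, hm, if_pos (by omega)]
        rw [List.find?_cons_of_neg]
        simp; omega
      · have hm : ¬ pvM (q :: rest) < br := by simp [pvM]; omega
        rw [if_neg h2, if_neg hm]

theorem pvLookup_none_of (l : List (String × List (String × String))) (k : String)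
    (hk : ∀ p ∈ l, p.1 ≠ k) : pvLookup l k = none := by
  unfold pvLookup
  rw [List.find?_eq_none.mpr (fun p hp => by simpa using hk p hp)]
  rfl

-- key-match and rank-match tests agree, one lemma per priority position
theorem pvPred0 (p : String × List (String × String)) :
    ((p.1 == "performance") = (pvRank p.1 == (0 : Int))) := by
  rw [pvRank_eq]; by_cases h : p.1 = "performance" <;> simp [h] <;> split_ifs <;> simp

theorem pvPred1 (p : String × List (String × String)) :
    ((p.1 == "innovation") = (pvRank p.1 == (1 : Int))) := by
  rw [pvRank_eq]; by_cases h : p.1 = "innovation" <;> simp [h] <;> split_ifs <;> simp_all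

theorem pvPred2 (p : String × List (String × String)) :
    ((p.1 == "feature") = (pvRank p.1 == (2 : Int))) := by
  rw [pvRank_eq]; by_cases h : p.1 = "feature" <;> simp [h] <;> split_ifs <;> simp_all

theorem pvPred3 (p : String × List (String × String)) :
    ((p.1 == "business") = (pvRank p.1 == (3 : Int))) := by
  rw [pvRank_eq]; by_cases h : p.1 = "business" <;> simp [h] <;> split_ifs <;> simp_all

-- a priority type strictly above the minimum rank is absent from the dict
theorem pvLookup_none_of_lt (stories : List (String × List (String × String)))
    (k : String) (c : Int) (hk : pvRank k = c) (hc : c < pvM stories) :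
    pvLookup stories k = none := by
  apply pvLookup_none_of
  intro p hp hpk
  have h1 := pvM_le stories p hp
  rw [hpk, hk] at h1
  omega

-- A's loop also returns the first pair attaining the minimum rank, for nonempty stories
theorem pvLoopA_spec (stories : List (String × List (String × String))) (h : stories ≠ []) :
    pvLoopA stories pvPriority =
      (stories.find? (fun p => pvRank p.1 == pvM stories)).map Prod.snd := by
  obtain ⟨w, hw, hwr⟩ := pvM_mem stories h
  have h0 : 0 ≤ pvM stories := hwr ▸ pvRank_nonneg w.1
  have h4 : pvM stories ≤ 4 := hwr ▸ pvRank_le_four w.1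
  have hcase : pvM stories = 0 ∨ pvM stories = 1 ∨ pvM stories = 2 ∨ pvM stories = 3 ∨
      pvM stories = 4 := by omega
  have hfind : ∀ (c : Int) (k : String), pvM stories = c →
      ((fun p : String × List (String × String) => p.1 == k) =
        (fun p => pvRank p.1 == pvM stories)) →
      pvLookup stories k = (stories.find? (fun p => pvRank p.1 == pvM stories)).map Prod.snd ∧
      ∃ v, pvLookup stories k = some v := by
    intro c k hc hpred
    have heq : pvLookup stories k =
        (stories.find? (fun p => pvRank p.1 == pvM stories)).map Prod.snd := by
      unfold pvLookup; rw [hpred]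
    refine ⟨heq, ?_⟩
    rw [heq]
    have : (stories.find? (fun p => pvRank p.1 == pvM stories)).isSome := by
      rw [List.find?_isSome]
      exact ⟨w, hw, by simp [hwr]⟩
    obtain ⟨q, hq⟩ := Option.isSome_iff_exists.mp this
    exact ⟨q.2, by rw [hq]; rfl⟩
  rcases hcase with hm | hm | hm | hm | hm
  · obtain ⟨heq, v, hv⟩ := hfind 0 "performance" hm
      (by funext p; rw [pvPred0, hm])
    simp only [pvLoopA, pvPriority]
    rw [hv, ← heq, hv]
  · have n0 : pvLookup stories "performance" = none :=
      pvLookup_none_of_lt stories _ 0 (by decide) (by omega)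
    obtain ⟨heq, v, hv⟩ := hfind 1 "innovation" hm
      (by funext p; rw [pvPred1, hm])
    simp only [pvLoopA, pvPriority]
    rw [n0, hv, ← heq, hv]
  · have n0 : pvLookup stories "performance" = none :=
      pvLookup_none_of_lt stories _ 0 (by decide) (by omega)
    have n1 : pvLookup stories "innovation" = none :=
      pvLookup_none_of_lt stories _ 1 (by decide) (by omega)
    obtain ⟨heq, v, hv⟩ := hfind 2 "feature" hm
      (by funext p; rw [pvPred2, hm])
    simp only [pvLoopA, pvPriority]
    rw [n0, n1, hv, ← heq, hv]
  · have n0 : pvLookup stories "performance" = none :=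
      pvLookup_none_of_lt stories _ 0 (by decide) (by omega)
    have n1 : pvLookup stories "innovation" = none :=
      pvLookup_none_of_lt stories _ 1 (by decide) (by omega)
    have n2 : pvLookup stories "feature" = none :=
      pvLookup_none_of_lt stories _ 2 (by decide) (by omega)
    obtain ⟨heq, v, hv⟩ := hfind 3 "business" hm
      (by funext p; rw [pvPred3, hm])
    simp only [pvLoopA, pvPriority]
    rw [n0, n1, n2, hv, ← heq, hv]
  · have n0 : pvLookup stories "performance" = none :=
      pvLookup_none_of_lt stories _ 0 (by decide) (by omega)
    have n1 : pvLookup stories "innovation" = none :=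
      pvLookup_none_of_lt stories _ 1 (by decide) (by omega)
    have n2 : pvLookup stories "feature" = none :=
      pvLookup_none_of_lt stories _ 2 (by decide) (by omega)
    have n3 : pvLookup stories "business" = none :=
      pvLookup_none_of_lt stories _ 3 (by decide) (by omega)
    simp only [pvLoopA, pvPriority]
    rw [n0, n1, n2, n3]
    cases stories with
    | nil => exact absurd rfl h
    | cons q rest =>
      have hq : pvRank q.1 = 4 := by
        have h1 := pvM_le (q :: rest) q List.mem_cons_self
        have h2 := pvRank_le_four q.1
        omega
      rw [List.find?_cons_of_pos (by simp [hq, hm])]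
      simp

-- ===== VERDICT (by name: the statement is the Claim_ definition above) =====
theorem get_most_impactful_story_py_spec : Claim_equal_get_most_impactful_story_py := by
  intro stories _
  unfold Spec_get_most_impactful_story_py get_most_impactful_story_py get_most_impactful_story_py_alt
  by_cases h : stories = []
  · subst h; simp
  · rw [if_neg h, pvFold_spec stories none 5 le_rfl, pvLoopA_spec stories h]
    have : pvM stories < 5 := by
      obtain ⟨p, _, hp⟩ := pvM_mem stories h
      have := pvRank_le_four p.1; omega
    simp [this]
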